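-- pv_equiv track=rewrite | github.com/Arun-Lama/floorsheet_analysis | scripts/convert_sector_to_index_viceversa.py | convert_sector_or_index
-- ===== SOURCE A (Python) =====
-- def convert_sector_or_index(name: str) -> str:
--     """
--     Convert between sector name and index name.
--     Case-insensitive. Returns the corresponding name if found, else raises an error.
--     """
--     mapping = {
--         'Commercial Banks': 'Banking SubIndex',
--         'Development Banks': 'Development Bank Index',
--         'Finance': 'Finance Index',
--         'Hotels And Tourism': 'Hotels And Tourism',
--         'Hydro Power': 'HydroPower Index',
--         'Investment': 'Investment',
--         'Life Insurance': 'Life Insurance',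
--         'Manufacturing And Processing': 'Manufacturing And Processing',
--         'Microfinance': 'Microfinance Index',
--         'Non Life Insurance': 'Non Life Insurance',
--         'Others': 'Others Index',
--         'Tradings': 'Trading Index'
--     }
--
--     # Build reverse mapping
--     reverse_mapping = {v.lower(): k for k, v in mapping.items()}
--
--     # Normalize input
--     name_clean = name.strip().lower()
--
--     # Check and return match from either direction
--     for sector, index in mapping.items():
--         if name_clean == sector.lower():
--             return index
--         if name_clean == index.lower():
--             return sector
--
--     raise ValueError(f"No match found for '{name}' in sector or index names.")
-- ===== SOURCE B (Python) =====
-- def convert_sector_or_index(name: str) -> str: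
--     """
--     Convert between sector name and index name.
--     Case-insensitive. Returns the corresponding name if found, else raises an error.
--     """
--     pairs = [
--         ('Commercial Banks', 'Banking SubIndex'),
--         ('Development Banks', 'Development Bank Index'),
--         ('Finance', 'Finance Index'),
--         ('Hotels And Tourism', 'Hotels And Tourism'),
--         ('Hydro Power', 'HydroPower Index'),
--         ('Investment', 'Investment'),
--         ('Life Insurance', 'Life Insurance'),
--         ('Manufacturing And Processing', 'Manufacturing And Processing'),
--         ('Microfinance', 'Microfinance Index'),
--         ('Non Life Insurance', 'Non Life Insurance'),
--         ('Others', 'Others Index'),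
--         ('Tradings', 'Trading Index'),
--     ]
--     # Flatten both directions into one table sorted by lowered key; duplicate
--     # keys (self-mapping entries) carry identical answers, so any match is right.
--     table = sorted([(s.lower(), i) for s, i in pairs] +
--                    [(i.lower(), s) for s, i in pairs], key=lambda p: p[0])
--     key = name.strip().lower()
--     # Leftmost binary search for key.
--     lo, hi = 0, len(table)
--     while lo < hi:
--         mid = (lo + hi) // 2
--         if table[mid][0] < key:
--             lo = mid + 1
--         else:
--             hi = mid
--     if lo < len(table) and table[lo][0] == key:
--         return table[lo][1]
--     raise ValueError(f"No match found for '{name}' in sector or index names.")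
-- ===== Notes on version B (the rewrite author's own statement) =====
-- stated objective: alternative
-- what changed: Replaces A's per-call two-comparison linear scan of the mapping with a different algorithm: flatten both directions into one list of (lowered key, answer) pairs, sort it by key, and resolve the normalized name with a leftmost binary search; duplicate keys only arise from self-mapping entries and carry identical answers, so any match is the same value A's scan returns, and the unused reverse_mapping is dropped.
import Mathlib
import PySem

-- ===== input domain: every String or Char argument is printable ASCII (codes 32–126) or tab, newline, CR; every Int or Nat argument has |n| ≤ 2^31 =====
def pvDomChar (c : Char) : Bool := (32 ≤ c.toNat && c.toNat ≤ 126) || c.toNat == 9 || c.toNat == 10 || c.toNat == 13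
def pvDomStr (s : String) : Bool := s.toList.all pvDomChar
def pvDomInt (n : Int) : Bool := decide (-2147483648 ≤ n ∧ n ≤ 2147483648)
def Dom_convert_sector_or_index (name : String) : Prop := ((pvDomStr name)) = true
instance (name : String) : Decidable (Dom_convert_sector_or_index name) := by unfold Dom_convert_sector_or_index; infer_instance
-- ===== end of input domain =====

-- B replaces A's per-call linear scan by flattening both directions into one table
-- sorted by lowered key and answering with a leftmost binary search — an alternative
-- algorithm of similar cost; equal wherever A returns (Pre_ excludes the inputs where
-- A raises ValueError, where B raises too).


-- the shared literal mapping (A's dict / B's pairs list)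
def pvMapping : List (String × String) :=
  [("Commercial Banks", "Banking SubIndex"),
   ("Development Banks", "Development Bank Index"),
   ("Finance", "Finance Index"),
   ("Hotels And Tourism", "Hotels And Tourism"),
   ("Hydro Power", "HydroPower Index"),
   ("Investment", "Investment"),
   ("Life Insurance", "Life Insurance"),
   ("Manufacturing And Processing", "Manufacturing And Processing"),
   ("Microfinance", "Microfinance Index"),
   ("Non Life Insurance", "Non Life Insurance"),
   ("Others", "Others Index"),
   ("Tradings", "Trading Index")]

-- ===== PORT A =====
-- A's for-loop over mapping.items(): first match wins; none = the ValueError branch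
def pvAScan (clean : String) : List (String × String) → Option String
  | [] => none
  | (sector, index) :: rest =>
    if clean = PySem.Str.lower sector then some index
    else if clean = PySem.Str.lower index then some sector
    else pvAScan clean rest

-- .getD "" stands for the final 'raise ValueError' (excluded by Pre_)
def convert_sector_or_index (name : String) : String :=
  (pvAScan (PySem.Str.lower (PySem.Str.strip name)) pvMapping).getD ""

-- ===== PORT B =====
-- B's table: both directions flattened, sorted by lowered key (Python sorted, key=p[0]).
-- Keys are kept as List Char (PySem's string representation): Python's string '<'
-- is exactly the lexicographic code-point order, which List Char's '<' matches.
def pvTable : List (List Char × String) :=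
  PySem.List.sorted
    (pvMapping.map (fun p => ((PySem.Str.lower p.1).toList, p.2)) ++
     pvMapping.map (fun p => ((PySem.Str.lower p.2).toList, p.1)))
    (fun p => p.1) false

-- B's while-loop: leftmost binary search for key in table (indices lo ≤ hi);
-- fuel = hi - lo bounds the iterations, making the loop a structural recursion
def pvBisectGo (table : List (List Char × String)) (key : List Char) :
    Nat → Nat → Nat → Nat
  | 0, lo, _ => lo
  | fuel + 1, lo, hi =>
    if lo < hi then
      let mid := (lo + hi) / 2
      if (table.getD mid ([], "")).1 < key then pvBisectGo table key fuel (mid + 1) hi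
      else pvBisectGo table key fuel lo mid
    else lo

def pvBisectLeft (table : List (List Char × String)) (key : List Char) (lo hi : Nat) : Nat :=
  pvBisectGo table key (hi - lo) lo hi

-- .getD "" stands for the 'raise ValueError' branch (excluded by Pre_)
def convert_sector_or_index_alt (name : String) : String :=
  let key := (PySem.Str.lower (PySem.Str.strip name)).toList
  let lo := pvBisectLeft pvTable key 0 pvTable.length
  if lo < pvTable.length ∧ (pvTable.getD lo ([], "")).1 = key then
    (pvTable.getD lo ([], "")).2
  else ""

-- ===== PRECONDITION & SPEC =====
-- Pre_ excludes exactly the inputs on which A raises ValueError (no match either way)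
def Pre_convert_sector_or_index (name : String) : Prop :=
  PySem.Str.lower (PySem.Str.strip name) ∈
    ["commercial banks", "banking subindex", "development banks",
     "development bank index", "finance", "finance index", "hotels and tourism",
     "hydro power", "hydropower index", "investment", "life insurance",
     "manufacturing and processing", "microfinance", "microfinance index",
     "non life insurance", "others", "others index", "tradings", "trading index"]
instance (name : String) : Decidable (Pre_convert_sector_or_index name) := by
  unfold Pre_convert_sector_or_index; infer_instance

def pvWitness_convert_sector_or_index : String := " Hydro Power "

def Spec_convert_sector_or_index (name : String) (out : String) : Prop := out = convert_sector_or_index_alt name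
instance (name : String) (out : String) : Decidable (Spec_convert_sector_or_index name out) := by unfold Spec_convert_sector_or_index; infer_instance

-- ===== CLAIM =====
def Claim_equal_convert_sector_or_index : Prop := ∀ (name : String), Dom_convert_sector_or_index name → Pre_convert_sector_or_index name → Spec_convert_sector_or_index name (convert_sector_or_index name)

-- ===== LEMMAS AND PROOFS =====

-- both programs depend only on the normalized name; for each admitted normal form
-- the scan and the binary search agree (checked by kernel evaluation)
theorem pvScan_eq_bsearch (c : String)
    (h : c ∈ ["commercial banks", "banking subindex", "development banks",
      "development bank index", "finance", "finance index", "hotels and tourism",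
      "hydro power", "hydropower index", "investment", "life insurance",
      "manufacturing and processing", "microfinance", "microfinance index",
      "non life insurance", "others", "others index", "tradings", "trading index"]) :
    (pvAScan c pvMapping).getD "" =
      (let lo := pvBisectLeft pvTable c.toList 0 pvTable.length
       if lo < pvTable.length ∧ (pvTable.getD lo ([], "")).1 = c.toList then
         (pvTable.getD lo ([], "")).2
       else "") := by
  fin_cases h <;> decide

-- ===== VERDICT =====
theorem convert_sector_or_index_spec : Claim_equal_convert_sector_or_index := by
  intro name _ hpre
  unfold Spec_convert_sector_or_index convert_sector_or_index convert_sector_or_index_alt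
  exact pvScan_eq_bsearch _ hpre
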